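-- pv_equiv track=rewrite | github.com/kyberlox/Intranet2 | code/main.py | markdown_to_plain
-- ===== SOURCE A (Python) =====
-- def markdown_to_plain(text: str) -> str:
--     """
--     Простое преобразование Markdown в текст БЕЗ HTML.
--     Блоки кода помечаем специальными метками.
--     """
--     if not text:
--         return text
--
--     result = []
--     lines = text.split('\n')
--     i = 0
--
--     while i < len(lines):
--         line = lines[i]
--
--         # Блок кода ```
--         if line.strip().startswith('```'):
--             # Начало блока кода
--             language = line.strip()[3:].strip() or "text"
--             code_lines = []
--
--             i += 1
--             while i < len(lines) and not lines[i].strip().startswith('```'):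
--                 code_lines.append(lines[i])
--                 i += 1
--
--             # Пропускаем закрывающий ```
--             i += 1
--
--             # Собираем код
--             code_content = '\n'.join(code_lines).strip()
--
--             # Определяем язык (особенно HTTP)
--             if language == "text":
--                 first_line = code_content.split('\n')[0] if '\n' in code_content else code_content
--                 if any(method.upper() in first_line.upper() for method in ['GET', 'POST', 'PUT', 'DELETE']):
--                     language = "http"
--
--             # Добавляем специальную метку для JS
--             result.append(f'[CODE_BLOCK language="{language}"]{code_content}[/CODE_BLOCK]')
--             continue
--
--         # Обычный текст
--         result.append(line)
--         i += 1
--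
--     return '\n'.join(result)
-- ===== SOURCE B (Python) =====
-- def markdown_to_plain(text: str) -> str:
--     """
--     Простое преобразование Markdown в текст БЕЗ HTML.
--     Блоки кода помечаем специальными метками.
--     Single-pass state machine (in_code flag + accumulators) instead of
--     nested index loops.
--     """
--     if not text:
--         return text
--
--     out = []
--     in_code = False
--     language = ""
--     code_lines = []
--
--     for line in text.split('\n'):
--         stripped = line.strip()
--         if stripped.startswith('```'):
--             if in_code:
--                 # closing fence: flush the accumulated block
--                 out.append(_code_marker(language, code_lines))
--                 in_code = False
--                 code_lines = []
--             else:
--                 # opening fence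
--                 in_code = True
--                 language = stripped[3:].strip() or "text"
--         elif in_code:
--             code_lines.append(line)
--         else:
--             out.append(line)
--
--     if in_code:
--         # unclosed block runs to the end of the text
--         out.append(_code_marker(language, code_lines))
--
--     return '\n'.join(out)
--
--
-- def _code_marker(language: str, code_lines: list) -> str:
--     code_content = '\n'.join(code_lines).strip()
--     if language == "text":
--         first_line = code_content.split('\n')[0] if '\n' in code_content else code_content
--         if any(method.upper() in first_line.upper() for method in ['GET', 'POST', 'PUT', 'DELETE']):
--             language = "http"
--     return f'[CODE_BLOCK language="{language}"]{code_content}[/CODE_BLOCK]'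
-- ===== Notes on version B (the rewrite author's own statement) =====
-- stated objective: simpler
-- what changed: Replaces A's index-based outer while-loop with a nested inner scan for the closing fence by a single for-loop state machine over the split lines (in_code flag + code-line accumulator, with a final flush for an unclosed block).
import Mathlib
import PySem

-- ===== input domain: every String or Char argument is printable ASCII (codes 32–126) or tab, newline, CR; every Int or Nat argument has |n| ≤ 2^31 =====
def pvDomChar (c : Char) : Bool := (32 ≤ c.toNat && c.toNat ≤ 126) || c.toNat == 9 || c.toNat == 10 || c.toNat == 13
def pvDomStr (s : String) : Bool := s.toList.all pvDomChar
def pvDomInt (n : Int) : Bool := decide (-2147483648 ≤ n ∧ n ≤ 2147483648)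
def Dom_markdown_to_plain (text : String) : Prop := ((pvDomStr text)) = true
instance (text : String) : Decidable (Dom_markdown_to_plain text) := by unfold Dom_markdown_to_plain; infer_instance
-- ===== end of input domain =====

-- B replaces A's index-based outer loop with nested inner fence scan by a single-pass
-- state machine (in_code flag + accumulators); same output, same O(n) cost (objective: simpler).

-- ===== PORT A =====
-- A's outer `while i < len(lines)` with the inner `while … not fence` scan: the inner
-- scan is the takeWhile/dropWhile split of the remaining lines, the outer loop is
-- recursion on the remaining lines (i is the position reached).
-- `.getD []` / `.headD ""`: `split('\n')` never raises (sep ≠ "") and never returns an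
-- empty list, so these defaults are never used.
def mdLoopA : List String → List String
  | [] => []
  | line :: rest =>
    if PySem.Str.startswith (PySem.Str.strip line) "```" then
      let language :=
        let l := PySem.Str.strip (PySem.Str.slice (PySem.Str.strip line) (some 3) none)
        if l = "" then "text" else l
      let code_lines := rest.takeWhile (fun l => !(PySem.Str.startswith (PySem.Str.strip l) "```"))
      let rest' := (rest.dropWhile (fun l => !(PySem.Str.startswith (PySem.Str.strip l) "```"))).drop 1
      let code_content := PySem.Str.strip (PySem.Str.join "\n" code_lines)
      let language :=
        if language = "text" then
          let first_line :=
            if PySem.Str.isIn "\n" code_content then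
              ((PySem.Str.split? code_content "\n").getD []).headD ""
            else code_content
          if ["GET", "POST", "PUT", "DELETE"].any
              (fun method => PySem.Str.isIn (PySem.Str.upper method) (PySem.Str.upper first_line))
          then "http" else language
        else language
      ("[CODE_BLOCK language=\"" ++ language ++ "\"]" ++ code_content ++ "[/CODE_BLOCK]") :: mdLoopA rest'
    else
      line :: mdLoopA rest
termination_by ls => ls.length
decreasing_by
  · have h := List.length_dropWhile_le
      (fun l => !(PySem.Str.startswith (PySem.Str.strip l) "```")) rest
    simp only [List.length_drop, List.length_cons]
    omega
  · simp

def markdown_to_plain (text : String) : String :=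
  if text = "" then text
  else PySem.Str.join "\n" (mdLoopA ((PySem.Str.split? text "\n").getD []))

-- ===== PORT B =====
-- port of Source B's _code_marker helper (same never-used defaults as in A's port)
def mdCodeMarker (language : String) (code_lines : List String) : String :=
  let code_content := PySem.Str.strip (PySem.Str.join "\n" code_lines)
  let language :=
    if language = "text" then
      let first_line :=
        if PySem.Str.isIn "\n" code_content then
          ((PySem.Str.split? code_content "\n").getD []).headD ""
        else code_content
      if ["GET", "POST", "PUT", "DELETE"].any
          (fun method => PySem.Str.isIn (PySem.Str.upper method) (PySem.Str.upper first_line))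
      then "http" else language
    else language
  "[CODE_BLOCK language=\"" ++ language ++ "\"]" ++ code_content ++ "[/CODE_BLOCK]"

-- Source B's single for-loop, state = (out, in_code, language, code_lines)
def mdLoopB : List String → List String → Bool → String → List String → List String
  | [], out, in_code, language, code_lines =>
    if in_code then out ++ [mdCodeMarker language code_lines] else out
  | line :: rest, out, in_code, language, code_lines =>
    let stripped := PySem.Str.strip line
    if PySem.Str.startswith stripped "```" then
      if in_code then
        mdLoopB rest (out ++ [mdCodeMarker language code_lines]) false language []
      else
        let l := PySem.Str.strip (PySem.Str.slice stripped (some 3) none)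
        mdLoopB rest out true (if l = "" then "text" else l) code_lines
    else if in_code then
      mdLoopB rest out in_code language (code_lines ++ [line])
    else
      mdLoopB rest (out ++ [line]) in_code language code_lines

def markdown_to_plain_alt (text : String) : String :=
  if text = "" then text
  else PySem.Str.join "\n" (mdLoopB ((PySem.Str.split? text "\n").getD []) [] false "" [])

-- ===== PRECONDITION & SPEC =====
def Spec_markdown_to_plain (text : String) (out : String) : Prop := out = markdown_to_plain_alt text
instance (text : String) (out : String) : Decidable (Spec_markdown_to_plain text out) := by unfold Spec_markdown_to_plain; infer_instance

-- ===== CLAIM (what is proved, stated in full; the proofs are below) =====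
def Claim_equal_markdown_to_plain : Prop := ∀ (text : String), Dom_markdown_to_plain text → Spec_markdown_to_plain text (markdown_to_plain text)

-- ===== LEMMAS AND PROOFS =====

-- the accumulated output is a prefix: B's loop with accumulator `out` is `out ++` the loop from []
lemma mdLoopB_out (ls : List String) : ∀ (out : List String) (ic : Bool) (lang : String)
    (code : List String), mdLoopB ls out ic lang code = out ++ mdLoopB ls [] ic lang code := by
  induction ls with
  | nil =>
    intro out ic lang code
    simp only [mdLoopB]
    split_ifs <;> simp
  | cons line rest ih =>
    intro out ic lang code
    simp only [mdLoopB]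
    split_ifs
    · rw [ih (out ++ [mdCodeMarker lang code]), ih ([] ++ [mdCodeMarker lang code])]
      simp
    · exact ih _ _ _ _
    · exact ih _ _ _ _
    · exact ih _ _ _ _
    · rw [ih (out ++ [line]), ih ([] ++ [line])]
      simp

-- in-code state: B's loop accumulates exactly the lines up to the next fence, flushes, and goes on
lemma mdLoopB_true (ls : List String) : ∀ (lang : String) (code : List String),
    mdLoopB ls [] true lang code =
      mdCodeMarker lang
          (code ++ ls.takeWhile (fun l => !(PySem.Str.startswith (PySem.Str.strip l) "```"))) ::
        mdLoopB ((ls.dropWhile (fun l => !(PySem.Str.startswith (PySem.Str.strip l) "```"))).drop 1)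
          [] false lang [] := by
  induction ls with
  | nil => intro lang code; simp [mdLoopB]
  | cons line rest ih =>
    intro lang code
    by_cases h : PySem.Str.startswith (PySem.Str.strip line) "```"
    · simp only [mdLoopB, h, if_true, List.takeWhile_cons, List.dropWhile_cons, Bool.not_true,
        Bool.false_eq_true, if_false, List.drop_succ_cons, List.drop_zero]
      rw [mdLoopB_out rest ([] ++ [mdCodeMarker lang code])]
      simp
    · simp only [mdLoopB, h, Bool.not_false, List.takeWhile_cons, List.dropWhile_cons,
        ite_true]
      rw [ih lang (code ++ [line])]
      simp

-- plain state with empty code accumulator: B's state machine computes A's recursion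
lemma mdLoopA_eq_B : ∀ (n : Nat) (ls : List String), ls.length ≤ n →
    ∀ (lang : String), mdLoopA ls = mdLoopB ls [] false lang [] := by
  intro n
  induction n with
  | zero =>
    intro ls hls lang
    have : ls = [] := List.eq_nil_of_length_eq_zero (Nat.le_zero.mp hls)
    subst this
    simp [mdLoopA, mdLoopB]
  | succ n ih =>
    intro ls hls lang
    match ls with
    | [] => simp [mdLoopA, mdLoopB]
    | line :: rest =>
      by_cases h : PySem.Str.startswith (PySem.Str.strip line) "```"
      · rw [mdLoopA]
        simp only [h, if_true]
        simp only [mdLoopB, h, if_true, Bool.false_eq_true, if_false]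
        rw [mdLoopB_true]
        simp only [List.nil_append]
        have hlen : ((rest.dropWhile
            (fun l => !(PySem.Str.startswith (PySem.Str.strip l) "```"))).drop 1).length ≤ n := by
          have hd := List.length_dropWhile_le
            (fun l => !(PySem.Str.startswith (PySem.Str.strip l) "```")) rest
          simp only [List.length_drop]
          simp only [List.length_cons] at hls
          omega
        rw [← ih _ hlen]
        rfl
      · rw [mdLoopA]
        simp only [h]
        simp only [mdLoopB, h, Bool.false_eq_true, if_false]
        rw [mdLoopB_out rest ([] ++ [line])]
        simp only [List.nil_append, List.singleton_append]
        have hlen : rest.length ≤ n := by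
          simp only [List.length_cons] at hls; omega
        rw [ih rest hlen lang]

-- ===== VERDICT (by name: the statement is the Claim_ definition above) =====
theorem markdown_to_plain_spec : Claim_equal_markdown_to_plain := by
  intro text _
  unfold Spec_markdown_to_plain markdown_to_plain markdown_to_plain_alt
  by_cases h : text = ""
  · simp [h]
  · simp only [h, if_false]
    rw [mdLoopA_eq_B ((PySem.Str.split? text "\n").getD []).length _ le_rfl ""]
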